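-- pv_equiv track=rewrite | github.com/douglasgalm781/sn45_code | coding/finetune/pipeline.py | deduplicate_timestamps
-- ===== SOURCE A (Python) =====
-- from typing import List
--
-- def deduplicate_timestamps(timestamps: List[int]) -> List[int]:
--     """
--     Deduplicate timestamps by removing duplicates and keeping the most recent ones.
--     If any timestamps are within 20 blocks of each other, keep the earliest one.
--
--     Args:
--         timestamps (List[int]): The list of timestamps to deduplicate.
--
--     Returns:
--         List[int]: The deduplicated timestamps.
--     """
--     if not timestamps:
--         return []
--
--     # Sort timestamps in ascending order
--     sorted_timestamps = sorted(timestamps)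
--     result = []
--
--     # Iterate through sorted timestamps
--     for ts in sorted_timestamps:
--         # Check if current timestamp is at least 20 blocks away from all timestamps in result
--         should_add = True
--         for existing_ts in result:
--             if abs(ts - existing_ts) <= 20:
--                 should_add = False
--                 break
--
--         if should_add:
--             result.append(ts)
--
--     return result
-- ===== SOURCE B (Python) =====
-- from typing import List
--
-- def deduplicate_timestamps(timestamps: List[int]) -> List[int]:
--     result = []
--     last = None
--     for ts in sorted(timestamps):
--         if last is None or ts - last > 20:
--             result.append(ts)
--             last = ts
--     return result
-- ===== Notes on version B (the rewrite author's own statement) =====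
-- stated objective: faster
-- what changed: Instead of scanning the whole kept-result list for every timestamp, B compares each sorted timestamp only against the last kept one, since the sorted order makes the last kept element the closest.
import Mathlib
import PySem

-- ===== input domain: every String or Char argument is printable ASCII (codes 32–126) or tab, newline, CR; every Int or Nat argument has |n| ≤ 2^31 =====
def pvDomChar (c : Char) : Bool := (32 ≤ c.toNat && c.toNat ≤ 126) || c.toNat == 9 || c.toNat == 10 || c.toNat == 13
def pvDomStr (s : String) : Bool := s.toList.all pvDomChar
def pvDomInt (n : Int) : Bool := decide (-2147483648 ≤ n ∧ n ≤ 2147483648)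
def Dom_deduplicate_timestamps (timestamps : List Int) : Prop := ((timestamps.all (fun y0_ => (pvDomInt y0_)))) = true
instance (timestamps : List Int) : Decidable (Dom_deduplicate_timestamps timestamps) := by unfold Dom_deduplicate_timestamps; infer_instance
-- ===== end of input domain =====

-- B replaces A's inner scan over the whole kept list with a single comparison against the
-- last kept timestamp (valid because the list is processed in sorted order): O(n^2) → O(n log n).

-- ===== PORT A =====
def deduplicate_timestamps (timestamps : List Int) : List Int :=
  if timestamps = [] then []
  else
    (PySem.List.sorted timestamps (fun x => x) false).foldl
      (fun result ts =>
        -- should_add = not any existing within 20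
        if result.any (fun existing_ts => (ts - existing_ts).natAbs ≤ 20) then result
        else result ++ [ts]) []

-- ===== PORT B =====
def deduplicate_timestamps_alt (timestamps : List Int) : List Int :=
  ((PySem.List.sorted timestamps (fun x => x) false).foldl
    (fun (st : List Int × Option Int) ts =>
      match st.2 with
      | none => (st.1 ++ [ts], some ts)
      | some last => if ts - last > 20 then (st.1 ++ [ts], some ts) else st)
    ([], none)).1

-- ===== PRECONDITION & SPEC =====
def Spec_deduplicate_timestamps (timestamps : List Int) (out : List Int) : Prop := out = deduplicate_timestamps_alt timestamps
instance (timestamps : List Int) (out : List Int) : Decidable (Spec_deduplicate_timestamps timestamps out) := by unfold Spec_deduplicate_timestamps; infer_instance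

-- ===== CLAIM (what is proved, stated in full; the proofs are below) =====
def Claim_equal_deduplicate_timestamps : Prop := ∀ (timestamps : List Int), Dom_deduplicate_timestamps timestamps → Spec_deduplicate_timestamps timestamps (deduplicate_timestamps timestamps)

-- ===== LEMMAS AND PROOFS =====

-- Main invariant: with every kept element ≤ last, last kept in the result, and every
-- remaining input ≥ last, A's full-scan fold and B's last-only fold coincide.
theorem pv_fold_eq (xs : List Int) : ∀ (r : List Int) (l : Int),
    (∀ e ∈ r, e ≤ l) → l ∈ r → (∀ x ∈ xs, l ≤ x) → xs.Pairwise (· ≤ ·) →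
    xs.foldl (fun result ts =>
        if result.any (fun existing_ts => (ts - existing_ts).natAbs ≤ 20) then result
        else result ++ [ts]) r
      = (xs.foldl (fun (st : List Int × Option Int) ts =>
          match st.2 with
          | none => (st.1 ++ [ts], some ts)
          | some last => if ts - last > 20 then (st.1 ++ [ts], some ts) else st)
        (r, some l)).1 := by
  induction xs with
  | nil => intro r l _ _ _ _; rfl
  | cons t rest ih =>
    intro r l hle hmem hfut hpw
    have hlt : l ≤ t := hfut t (by simp)
    have hrest : ∀ x ∈ rest, t ≤ x := fun x hx => (List.pairwise_cons.mp hpw).1 x hx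
    have hpw' := (List.pairwise_cons.mp hpw).2
    simp only [List.foldl_cons]
    by_cases h : t - l > 20
    · have hany : r.any (fun existing_ts => (t - existing_ts).natAbs ≤ 20) = false := by
        simp only [List.any_eq_false, decide_eq_true_eq]
        intro e he
        have h1 : e ≤ l := hle e he
        omega
      rw [hany]
      simp only [if_pos h]
      exact ih (r ++ [t]) t
        (by intro e he; rcases List.mem_append.mp he with h' | h'
            · exact le_trans (hle e h') hlt
            · simp at h'; omega)
        (by simp)
        hrest hpw'
    · have hany : r.any (fun existing_ts => (t - existing_ts).natAbs ≤ 20) = true := by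
        simp only [List.any_eq_true, decide_eq_true_eq]
        exact ⟨l, hmem, by omega⟩
      rw [hany]
      simp only [if_neg h]
      exact ih r l hle hmem (fun x hx => le_trans hlt (hrest x hx)) hpw'

-- ===== VERDICT (by name: the statement is the Claim_ definition above) =====
theorem deduplicate_timestamps_spec : Claim_equal_deduplicate_timestamps := by
  intro timestamps _
  unfold Spec_deduplicate_timestamps deduplicate_timestamps deduplicate_timestamps_alt
  have hpw := PySem.List.sorted_pairwise (xs := timestamps) (key := fun x : Int => x)
  cases hs : PySem.List.sorted timestamps (fun x => x) false with
  | nil =>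
    have : timestamps = [] := (PySem.List.sorted_eq_nil_iff timestamps (fun x => x) false).mp hs
    simp [this]
  | cons t rest =>
    have hne : timestamps ≠ [] := by
      intro h
      rw [(PySem.List.sorted_eq_nil_iff timestamps (fun x => x) false).mpr h] at hs
      exact List.cons_ne_nil t rest hs.symm
    rw [if_neg hne]
    have hpw2 : List.Pairwise (fun a b : Int => a ≤ b) (t :: rest) := hs ▸ hpw
    have hrest : ∀ x ∈ rest, t ≤ x := fun x hx => (List.pairwise_cons.mp hpw2).1 x hx
    have hpw' := (List.pairwise_cons.mp hpw2).2
    simp only [List.foldl_cons, List.any_nil, List.nil_append, if_neg Bool.false_ne_true]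
    exact pv_fold_eq rest [t] t (by simp) (by simp) hrest hpw'
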